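-- pv_equiv track=rewrite | github.com/mondas-mania/advent-of-code | 2023/Day_12/day12_part2.py | get_spring_permuation
-- ===== SOURCE A (Python) =====
-- def get_spring_permuation(springs: list) -> list:
--   if "?" not in springs:
--     return [springs]
--
--   spring_permutations = []
--   for potential in [".", "#"]:
--     new_springs = springs.copy()
--     pos = new_springs.index("?")
--     new_springs[pos] = potential
--     spring_permutations += get_spring_permuation(new_springs)
--
--   return spring_permutations
-- ===== SOURCE B (Python) =====
-- def get_spring_permuation(springs: list) -> list:
--   idxs = [i for i, s in enumerate(springs) if s == "?"]
--   combos = [[]]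
--   for _ in idxs:
--     combos = [[o] + rest for o in [".", "#"] for rest in combos]
--   result = []
--   for combo in combos:
--     new = springs.copy()
--     for i, o in zip(idxs, combo):
--       new[i] = o
--     result.append(new)
--   return result
-- ===== Notes on version B (the rewrite author's own statement) =====
-- stated objective: alternative
-- what changed: Replaced A's recursion (copy the list, rescan for the first '?' with .index, recurse per option) by a non-recursive product construction: collect the '?' indices once, enumerate all option combinations, and write each combination into one fresh copy of springs.
import Mathlib
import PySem

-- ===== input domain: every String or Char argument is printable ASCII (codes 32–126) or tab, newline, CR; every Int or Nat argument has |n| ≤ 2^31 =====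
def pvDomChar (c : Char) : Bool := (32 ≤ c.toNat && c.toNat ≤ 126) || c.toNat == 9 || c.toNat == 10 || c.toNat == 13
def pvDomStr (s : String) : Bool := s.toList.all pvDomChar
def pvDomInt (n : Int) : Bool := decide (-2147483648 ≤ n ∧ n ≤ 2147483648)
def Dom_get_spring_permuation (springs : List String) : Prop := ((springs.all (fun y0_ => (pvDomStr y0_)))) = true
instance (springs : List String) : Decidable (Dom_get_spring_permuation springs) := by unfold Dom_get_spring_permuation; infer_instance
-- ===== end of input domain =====

-- B replaces A's recursion (copy, scan for the first '?', recurse) by collecting the '?'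
-- indices once and writing each option combination into one fresh copy per output line.

-- ===== PORT A =====

-- termination helper for A's port: overwriting the first "?" with a non-"?" value
-- strictly decreases the number of "?" elements
theorem pv_count_set_first_q_lt (l : List String) (x : String)
    (hm : "?" ∈ l) (hx : x ≠ "?") :
    (l.set (l.idxOf "?") x).count "?" < l.count "?" := by
  induction l with
  | nil => cases hm
  | cons a t ih =>
    by_cases ha : a = "?"
    · subst ha
      simp [List.idxOf_cons_self, hx]
    · have hm' : "?" ∈ t := List.mem_of_ne_of_mem (fun he => ha he.symm) hm
      have := ih hm'
      simp [List.idxOf_cons_ne _ (by simpa using ha), ha]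
      omega

-- A: if no "?", return [springs]; otherwise, for each of "." and "#" (the Python
-- for-loop over the two-element literal, unrolled), copy springs, overwrite the
-- first "?" (Python .index — in range since "?" ∈ springs) and recurse, concatenating.
def get_spring_permuation (springs : List String) : List (List String) :=
  if hq : "?" ∈ springs then
    ([] : List (List String))
      ++ get_spring_permuation (springs.set (springs.idxOf "?") ".")
      ++ get_spring_permuation (springs.set (springs.idxOf "?") "#")
  else [springs]
termination_by springs.count "?"
decreasing_by
  · exact pv_count_set_first_q_lt springs "." hq (by decide)
  · exact pv_count_set_first_q_lt springs "#" hq (by decide)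

-- ===== PORT B =====
-- idxs = [i for i, s in enumerate(springs) if s == "?"]
-- combos = [[]]; for _ in idxs: combos = [[o] + rest for o in [".", "#"] for rest in combos]
-- result = []; for combo in combos: new = springs.copy(); for i, o in zip(idxs, combo): new[i] = o; result.append(new)
-- (new[i] = o is PySem.List.pySetD: every i here is a valid enumerate index, so Python never raises)
def get_spring_permuation_alt (springs : List String) : List (List String) :=
  let idxs := (PySem.List.enumerate springs 0).filterMap (fun p => if p.2 = "?" then some p.1 else none)
  let combos := idxs.foldl (fun combos _ => [".", "#"].flatMap (fun o => combos.map (o :: ·))) [[]]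
  combos.foldl (fun result combo =>
    result ++ [(idxs.zip combo).foldl (fun new io => PySem.List.pySetD new io.1 io.2) springs]) []

-- ===== PRECONDITION & SPEC =====
def Spec_get_spring_permuation (springs : List String) (out : List (List String)) : Prop := out = get_spring_permuation_alt springs
instance (springs : List String) (out : List (List String)) : Decidable (Spec_get_spring_permuation springs out) := by unfold Spec_get_spring_permuation; infer_instance

-- ===== CLAIM (what is proved, stated in full; the proofs are below) =====
def Claim_equal_get_spring_permuation : Prop := ∀ (springs : List String), Dom_get_spring_permuation springs → Spec_get_spring_permuation springs (get_spring_permuation springs)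

-- ===== LEMMAS AND PROOFS =====

-- structural reference function: all fillings of the '?' positions, leftmost most significant
def pvGen : List String → List (List String)
  | [] => [[]]
  | s :: rest => (if s = "?" then [".", "#"] else [s]).flatMap (fun o => (pvGen rest).map (o :: ·))

theorem pvGen_no_q (l : List String) (h : "?" ∉ l) : pvGen l = [l] := by
  induction l with
  | nil => rfl
  | cons a t ih =>
    have ha : a ≠ "?" := fun he => h (he ▸ List.mem_cons_self)
    have ht : "?" ∉ t := fun hm => h (List.mem_cons_of_mem _ hm)
    simp [pvGen, ha, ih ht]

-- key merge lemma for A: splitting on the first "?" reassembles pvGen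
theorem pvGen_set_first_q (l : List String) (hm : "?" ∈ l) :
    pvGen (l.set (l.idxOf "?") ".") ++ pvGen (l.set (l.idxOf "?") "#") = pvGen l := by
  induction l with
  | nil => cases hm
  | cons a t ih =>
    by_cases ha : a = "?"
    · subst ha
      simp [List.idxOf_cons_self, pvGen]
    · have hm' : "?" ∈ t := List.mem_of_ne_of_mem (fun he => ha he.symm) hm
      rw [List.idxOf_cons_ne _ (by simpa using ha)]
      simp only [List.set_cons_succ, pvGen, ha, if_false]
      rw [← ih hm']
      simp

theorem pvA_eq_pvGen (springs : List String) : get_spring_permuation springs = pvGen springs := by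
  by_cases hq : "?" ∈ springs
  · rw [get_spring_permuation, dif_pos hq]
    have h1 := pvA_eq_pvGen (springs.set (springs.idxOf "?") ".")
    have h2 := pvA_eq_pvGen (springs.set (springs.idxOf "?") "#")
    rw [List.nil_append, h1, h2, pvGen_set_first_q springs hq]
  · rw [get_spring_permuation, dif_neg hq, pvGen_no_q springs hq]
termination_by springs.count "?"
decreasing_by
  · exact pv_count_set_first_q_lt springs "." hq (by decide)
  · exact pv_count_set_first_q_lt springs "#" hq (by decide)

-- B-side proof machinery
def pvE (t : List String) (s : Int) : List Int :=
  (PySem.List.enumerate t s).filterMap (fun p => if p.2 = "?" then some p.1 else none)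

def pvCombos : Nat → List (List String)
  | 0 => [[]]
  | k + 1 => [".", "#"].flatMap (fun o => (pvCombos k).map (o :: ·))

def pvWrite (idxs : List Int) (combo : List String) (base : List String) : List String :=
  (idxs.zip combo).foldl (fun new io => PySem.List.pySetD new io.1 io.2) base

theorem pvE_cons (a : String) (t : List String) (s : Int) :
    pvE (a :: t) s = (if a = "?" then [s] else []) ++ pvE t (s + 1) := by
  by_cases ha : a = "?" <;> simp [pvE, PySem.List.enumerate_cons, ha]

theorem pvE_len (t : List String) (s : Int) : (pvE t s).length = t.count "?" := by
  induction t generalizing s with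
  | nil => rfl
  | cons a t ih =>
    rw [pvE_cons]
    by_cases ha : a = "?" <;> simp [ha, ih]

theorem pvCombos_step_comm (step : List (List String) → List (List String))
    (l : List Int) (acc : List (List String)) :
    l.foldl (fun cs _ => step cs) (step acc) = step (l.foldl (fun cs _ => step cs) acc) := by
  induction l generalizing acc with
  | nil => rfl
  | cons x xs ih => exact ih (step acc)

theorem pvCombos_foldl (l : List Int) :
    l.foldl (fun cs _ => [".", "#"].flatMap (fun o => cs.map (o :: ·))) [[]] = pvCombos l.length := by
  induction l with
  | nil => rfl
  | cons x xs ih =>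
    rw [List.foldl_cons, pvCombos_step_comm (fun cs => [".", "#"].flatMap (fun o => cs.map (o :: ·))), ih]
    rfl

-- the central lemma: writing every combination into the '?' slots of `pre ++ t`
-- (indices starting at pre.length) produces pvGen t, each line prefixed by pre
theorem pvMain (t : List String) (pre : List String) :
    (pvCombos (t.count "?")).map (fun c => pvWrite (pvE t (pre.length : Int)) c (pre ++ t))
      = (pvGen t).map (pre ++ ·) := by
  induction t generalizing pre with
  | nil => simp [pvE, pvCombos, pvWrite, pvGen, PySem.List.enumerate_nil]
  | cons a t ih =>
    by_cases ha : a = "?"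
    · subst ha
      have hc : ("?" :: t).count "?" = t.count "?" + 1 := by simp
      rw [pvE_cons, if_pos rfl, List.singleton_append, hc]
      rw [show pvGen ("?" :: t) = [".", "#"].flatMap (fun o => (pvGen t).map (o :: ·)) from by
            simp [pvGen],
          show pvCombos (t.count "?" + 1)
              = [".", "#"].flatMap (fun o => (pvCombos (t.count "?")).map (o :: ·)) from rfl]
      rw [List.map_flatMap, List.map_flatMap]
      apply List.flatMap_congr
      intro o _
      rw [List.map_map, List.map_map]
      have hset : ∀ (c : List String),
          pvWrite ((pre.length : Int) :: pvE t ((pre.length : Int) + 1)) (o :: c) (pre ++ "?" :: t)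
            = pvWrite (pvE t (((pre ++ [o]).length : Nat) : Int)) c ((pre ++ [o]) ++ t) := by
        intro c
        simp only [pvWrite, List.zip_cons_cons, List.foldl_cons, PySem.List.pySetD_natCast]
        have h1 : (pre ++ "?" :: t).set pre.length o = (pre ++ [o]) ++ t := by simp
        have h2 : ((pre ++ [o]).length : Int) = (pre.length : Int) + 1 := by simp
        rw [h1, h2]
      calc (pvCombos (t.count "?")).map
              ((fun c => pvWrite ((pre.length : Int) :: pvE t ((pre.length : Int) + 1)) c (pre ++ "?" :: t)) ∘ (o :: ·))
          = (pvCombos (t.count "?")).map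
              (fun c => pvWrite (pvE t (((pre ++ [o]).length : Nat) : Int)) c ((pre ++ [o]) ++ t)) := by
            apply List.map_congr_left; intro c _; exact hset c
        _ = (pvGen t).map ((pre ++ [o]) ++ ·) := ih (pre ++ [o])
        _ = (pvGen t).map ((pre ++ ·) ∘ (o :: ·)) := by
            apply List.map_congr_left; intro c _; simp
    · have hc : (a :: t).count "?" = t.count "?" := by simp [ha]
      rw [pvE_cons, if_neg ha, List.nil_append, hc]
      have h2 : ((pre.length : Int) + 1) = (((pre ++ [a]).length : Nat) : Int) := by simp
      have h3 : pre ++ a :: t = (pre ++ [a]) ++ t := by simp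
      rw [h2, h3, ih (pre ++ [a])]
      simp [pvGen, ha, List.map_map]

theorem pvAlt_eq_pvGen (springs : List String) : get_spring_permuation_alt springs = pvGen springs := by
  unfold get_spring_permuation_alt
  rw [PySem.List.foldl_append_singleton_eq_map, pvCombos_foldl]
  have he : (PySem.List.enumerate springs 0).filterMap
      (fun p => if p.2 = "?" then some p.1 else none) = pvE springs (([] : List String).length : Int) := rfl
  rw [he, pvE_len]
  have := pvMain springs []
  simpa using this

-- ===== VERDICT (by name: the statement is the Claim_ definition above) =====
theorem get_spring_permuation_spec : Claim_equal_get_spring_permuation := by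
  intro springs _
  unfold Spec_get_spring_permuation
  rw [pvA_eq_pvGen, pvAlt_eq_pvGen]
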